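-- pv_equiv track=rewrite | github.com/mvrogozov/algorithms | coderun/324_chairs.py | best_deals
-- ===== SOURCE A (Python) =====
-- def best_deals(
--     buyers_amount: int,
--     sellers_amount: int,
--     seller_prices: str,
--     buyer_prices: str
-- ) -> int:
--     buyer_prices = sorted(list(map(int, buyer_prices.split())), reverse=True)
--     seller_prices = sorted(list(map(int, seller_prices.split())))
--     deals_amount = min(buyers_amount, sellers_amount)
--     return sum(
--         (buyer_prices[i] - seller_prices[i] for i in range(deals_amount) if (
--             buyer_prices[i] - seller_prices[i] > 0
--         )
--         )
--     )
-- ===== SOURCE B (Python) =====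
-- def best_deals(
--     buyers_amount: int,
--     sellers_amount: int,
--     seller_prices: str,
--     buyer_prices: str
-- ) -> int:
--     buyers = [int(x) for x in buyer_prices.split()]
--     sellers = [int(x) for x in seller_prices.split()]
--     total = 0
--     for _ in range(min(buyers_amount, sellers_amount)):
--         b = max(buyers)
--         buyers.remove(b)
--         s = min(sellers)
--         sellers.remove(s)
--         if b - s > 0:
--             total += b - s
--     return total
-- ===== Notes on version B (the rewrite author's own statement) =====
-- stated objective: alternative
-- what changed: B does no sorting and no indexing: it repeatedly selects and removes the current maximum buyer and minimum seller from the unsorted lists, accumulating positive differences as it goes.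
import Mathlib
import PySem

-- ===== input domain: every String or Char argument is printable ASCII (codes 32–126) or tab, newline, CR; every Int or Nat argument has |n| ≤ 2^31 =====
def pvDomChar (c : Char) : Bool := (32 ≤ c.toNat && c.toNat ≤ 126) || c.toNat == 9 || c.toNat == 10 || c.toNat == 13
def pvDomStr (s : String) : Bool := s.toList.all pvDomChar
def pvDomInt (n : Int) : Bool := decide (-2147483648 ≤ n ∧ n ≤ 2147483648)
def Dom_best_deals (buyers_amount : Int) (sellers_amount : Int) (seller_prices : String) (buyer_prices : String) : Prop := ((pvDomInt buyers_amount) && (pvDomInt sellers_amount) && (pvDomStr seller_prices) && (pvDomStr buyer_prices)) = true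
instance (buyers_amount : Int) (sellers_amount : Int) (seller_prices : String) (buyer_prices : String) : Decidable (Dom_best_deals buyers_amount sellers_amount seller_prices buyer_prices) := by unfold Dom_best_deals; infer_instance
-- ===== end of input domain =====

-- B replaces A's sort-then-index pairing by repeated selection (pop max buyer / min seller from the
-- unsorted lists); alternative decomposition, not claimed faster.

-- ===== PORT A =====
-- A: sort buyers descending, sellers ascending, sum positive differences of the first
-- min(buyers_amount, sellers_amount) pairs.  Where Python raises (ValueError from int(),
-- IndexError from out-of-range indexing) the PySem primitives return none; those branches
-- return 0 here and are excluded by Pre_best_deals.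
def best_deals (buyers_amount : Int) (sellers_amount : Int) (seller_prices : String) (buyer_prices : String) : Int :=
  match (PySem.Str.split₀ buyer_prices).mapM PySem.Int.ofStr?,
        (PySem.Str.split₀ seller_prices).mapM PySem.Int.ofStr? with
  | some bl, some sl =>
      let bp := PySem.List.sorted bl (fun x => x) true
      let sp := PySem.List.sorted sl (fun x => x) false
      let deals_amount := min buyers_amount sellers_amount
      (PySem.List.pyRange 0 deals_amount 1).foldl (fun acc i =>
        match PySem.List.pyGet? bp i, PySem.List.pyGet? sp i with
        | some b, some s => if b - s > 0 then acc + (b - s) else acc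
        | _, _ => acc) 0          -- none = IndexError in Python; excluded by Pre_
  | _, _ => 0                      -- none = ValueError in Python; excluded by Pre_

-- ===== PORT B =====
-- the loop body of Source B: for _ in range(deals): pop max buyer, pop min seller, add positive diff
def bdLoop : Nat → List Int → List Int → Int → Int
  | 0, _, _, total => total
  | Nat.succ k, buyers, sellers, total =>
    match PySem.List.max? buyers (fun x => x) with
    | none => total                -- ValueError (max of empty list); excluded by Pre_
    | some b =>
      match PySem.List.min? sellers (fun x => x) with
      | none => total              -- ValueError (min of empty list); excluded by Pre_
      | some s =>
        match PySem.List.remove? buyers b with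
        | none => total            -- unreachable: the maximum is a member
        | some buyers' =>
          match PySem.List.remove? sellers s with
          | none => total          -- unreachable: the minimum is a member
          | some sellers' =>
            bdLoop k buyers' sellers' (if b - s > 0 then total + (b - s) else total)

def best_deals_alt (buyers_amount : Int) (sellers_amount : Int) (seller_prices : String) (buyer_prices : String) : Int :=
  match (PySem.Str.split₀ buyer_prices).mapM PySem.Int.ofStr? with
  | none => 0                      -- ValueError in Python; excluded by Pre_
  | some buyers =>
    match (PySem.Str.split₀ seller_prices).mapM PySem.Int.ofStr? with
    | none => 0                    -- ValueError in Python; excluded by Pre_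
    | some sellers => bdLoop (min buyers_amount sellers_amount).toNat buyers sellers 0

-- ===== PRECONDITION & SPEC =====
-- Pre_ excludes exactly the inputs where Python A raises: a whitespace token that is not an int
-- (ValueError) or min(buyers_amount, sellers_amount) exceeding a price-list length (IndexError).
def Pre_best_deals (buyers_amount : Int) (sellers_amount : Int) (seller_prices : String) (buyer_prices : String) : Prop :=
  ((PySem.Str.split₀ buyer_prices).all (fun t => (PySem.Int.ofStr? t).isSome) = true) ∧
  ((PySem.Str.split₀ seller_prices).all (fun t => (PySem.Int.ofStr? t).isSome) = true) ∧
  min buyers_amount sellers_amount ≤ ((PySem.Str.split₀ buyer_prices).length : Int) ∧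
  min buyers_amount sellers_amount ≤ ((PySem.Str.split₀ seller_prices).length : Int)
instance (buyers_amount : Int) (sellers_amount : Int) (seller_prices : String) (buyer_prices : String) : Decidable (Pre_best_deals buyers_amount sellers_amount seller_prices buyer_prices) := by unfold Pre_best_deals; infer_instance

def pvWitness_best_deals : Int × Int × String × String := (2, 2, "1 3", "5 2")

def Spec_best_deals (buyers_amount : Int) (sellers_amount : Int) (seller_prices : String) (buyer_prices : String) (out : Int) : Prop := out = best_deals_alt buyers_amount sellers_amount seller_prices buyer_prices
instance (buyers_amount : Int) (sellers_amount : Int) (seller_prices : String) (buyer_prices : String) (out : Int) : Decidable (Spec_best_deals buyers_amount sellers_amount seller_prices buyer_prices out) := by unfold Spec_best_deals; infer_instance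

-- ===== CLAIM (what is proved, stated in full; the proofs are below) =====
def Claim_equal_best_deals : Prop := ∀ (buyers_amount : Int) (sellers_amount : Int) (seller_prices : String) (buyer_prices : String), Dom_best_deals buyers_amount sellers_amount seller_prices buyer_prices → Pre_best_deals buyers_amount sellers_amount seller_prices buyer_prices → Spec_best_deals buyers_amount sellers_amount seller_prices buyer_prices (best_deals buyers_amount sellers_amount seller_prices buyer_prices)

-- ===== LEMMAS AND PROOFS =====

-- sum of positive differences of the first k head-pairs
def pairPos : Nat → List Int → List Int → Int
  | 0, _, _ => 0
  | Nat.succ k, b :: bs, s :: ss => (if b - s > 0 then b - s else 0) + pairPos k bs ss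
  | Nat.succ _, _, _ => 0

theorem mapM_some_of_all (xs : List String)
    (h : xs.all (fun t => (PySem.Int.ofStr? t).isSome) = true) :
    ∃ ys : List Int, xs.mapM PySem.Int.ofStr? = some ys ∧ ys.length = xs.length := by
  induction xs with
  | nil => exact ⟨[], rfl, rfl⟩
  | cons x xs ih =>
    simp only [List.all_cons, Bool.and_eq_true] at h
    obtain ⟨ys, hys, hlen⟩ := ih h.2
    obtain ⟨v, hv⟩ := Option.isSome_iff_exists.mp h.1
    exact ⟨v :: ys, by simp [List.mapM_cons, hv, hys], by simp [hlen]⟩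

theorem sorted_rev_cons (l : List Int) (m : Int)
    (h : PySem.List.max? l (fun x => x) = some m) :
    PySem.List.sorted l (fun x => x) true = m :: PySem.List.sorted (l.erase m) (fun x => x) true := by
  have hm : m ∈ l := PySem.List.max?_mem h
  haveI : Std.Antisymm (fun (a b : Int) => b ≤ a) := ⟨fun _ _ h1 h2 => le_antisymm h2 h1⟩
  apply List.Perm.eq_of_pairwise' (r := fun a b => b ≤ a)
  · exact PySem.List.sorted_pairwise_rev l (fun x => x)
  · refine List.Pairwise.cons ?_ (PySem.List.sorted_pairwise_rev _ (fun x => x))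
    intro y hy
    have : y ∈ l := List.mem_of_mem_erase ((PySem.List.mem_sorted _ _ _ _).mp hy)
    exact PySem.List.max?_isMax h y this
  · exact (PySem.List.sorted_perm _ _ _).trans
      ((List.perm_cons_erase hm).trans
        (List.Perm.cons m (PySem.List.sorted_perm _ _ _).symm))

theorem sorted_cons (l : List Int) (m : Int)
    (h : PySem.List.min? l (fun x => x) = some m) :
    PySem.List.sorted l (fun x => x) false = m :: PySem.List.sorted (l.erase m) (fun x => x) false := by
  have hm : m ∈ l := PySem.List.min?_mem h
  haveI : Std.Antisymm (fun (a b : Int) => a ≤ b) := ⟨fun _ _ h1 h2 => le_antisymm h1 h2⟩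
  apply List.Perm.eq_of_pairwise' (r := fun a b => a ≤ b)
  · exact PySem.List.sorted_pairwise l (fun x => x)
  · refine List.Pairwise.cons ?_ (PySem.List.sorted_pairwise _ (fun x => x))
    intro y hy
    have : y ∈ l := List.mem_of_mem_erase ((PySem.List.mem_sorted _ _ _ _).mp hy)
    exact PySem.List.min?_isMin h y this
  · exact (PySem.List.sorted_perm _ _ _).trans
      ((List.perm_cons_erase hm).trans
        (List.Perm.cons m (PySem.List.sorted_perm _ _ _).symm))

theorem bdLoop_eq (k : Nat) :
    ∀ (bl sl : List Int) (t : Int), k ≤ bl.length → k ≤ sl.length →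
    bdLoop k bl sl t =
      t + pairPos k (PySem.List.sorted bl (fun x => x) true)
                    (PySem.List.sorted sl (fun x => x) false) := by
  induction k with
  | zero => intro bl sl t _ _; simp [bdLoop, pairPos]
  | succ k ih =>
    intro bl sl t hb hs
    have hbne : bl ≠ [] := by intro h; subst h; simp at hb
    have hsne : sl ≠ [] := by intro h; subst h; simp at hs
    obtain ⟨b, hbmax⟩ : ∃ b, PySem.List.max? bl (fun x => x) = some b := by
      cases hmb : PySem.List.max? bl (fun x => x) with
      | none => exact absurd ((PySem.List.max?_eq_none_iff bl (fun x => x)).mp hmb) hbne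
      | some b => exact ⟨b, rfl⟩
    obtain ⟨s, hsmin⟩ : ∃ s, PySem.List.min? sl (fun x => x) = some s := by
      cases hms : PySem.List.min? sl (fun x => x) with
      | none => exact absurd ((PySem.List.min?_eq_none_iff sl (fun x => x)).mp hms) hsne
      | some s => exact ⟨s, rfl⟩
    have hbmem : b ∈ bl := PySem.List.max?_mem hbmax
    have hsmem : s ∈ sl := PySem.List.min?_mem hsmin
    have hrb : PySem.List.remove? bl b = some (bl.erase b) :=
      PySem.List.remove?_eq_some_erase bl b hbmem
    have hrs : PySem.List.remove? sl s = some (sl.erase s) :=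
      PySem.List.remove?_eq_some_erase sl s hsmem
    have hlb : (bl.erase b).length = bl.length - 1 := List.length_erase_of_mem hbmem
    have hls : (sl.erase s).length = sl.length - 1 := List.length_erase_of_mem hsmem
    rw [bdLoop, hbmax, hsmin]
    simp only [hrb, hrs]
    rw [ih (bl.erase b) (sl.erase s) _ (by omega) (by omega),
        sorted_rev_cons bl b hbmax, sorted_cons sl s hsmin, pairPos]
    split_ifs <;> omega

theorem pairPos_succ (k : Nat) :
    ∀ (B S : List Int), k < B.length → k < S.length →
    pairPos (k + 1) B S =
      pairPos k B S + (if B.getD k 0 - S.getD k 0 > 0 then B.getD k 0 - S.getD k 0 else 0) := by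
  induction k with
  | zero =>
    intro B S hb hs
    match B, S with
    | b :: bs, s :: ss => simp [pairPos]
  | succ k ih =>
    intro B S hb hs
    match B, S with
    | b :: bs, s :: ss =>
      simp only [List.length_cons] at hb hs
      show (if b - s > 0 then b - s else 0) + pairPos (k + 1) bs ss = _
      rw [ih bs ss (by omega) (by omega)]
      simp only [pairPos, List.getD_cons_succ]
      ring

theorem foldA (k : Nat) :
    ∀ (B S : List Int), k ≤ B.length → k ≤ S.length →
    (PySem.List.pyRange 0 (k : Int) 1).foldl (fun acc i =>
      match PySem.List.pyGet? B i, PySem.List.pyGet? S i with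
      | some b, some s => if b - s > 0 then acc + (b - s) else acc
      | _, _ => acc) 0 = pairPos k B S := by
  induction k with
  | zero => intro B S _ _; simp [PySem.List.pyRange_one_eq_nil, pairPos]
  | succ k ih =>
    intro B S hb hs
    have hsplit : PySem.List.pyRange 0 ((k : Int) + 1) 1 =
        PySem.List.pyRange 0 (k : Int) 1 ++ [(k : Int)] := by
      rw [PySem.List.pyRange_one_succ_right (by exact_mod_cast Nat.zero_le k)]
    have hgB : PySem.List.pyGet? B (k : Int) = some (B.getD k 0) := by
      rw [PySem.List.pyGet?_natCast, List.getD_eq_getElem?_getD,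
        List.getElem?_eq_getElem (show k < B.length by omega)]; rfl
    have hgS : PySem.List.pyGet? S (k : Int) = some (S.getD k 0) := by
      rw [PySem.List.pyGet?_natCast, List.getD_eq_getElem?_getD,
        List.getElem?_eq_getElem (show k < S.length by omega)]; rfl
    push_cast
    rw [hsplit, List.foldl_append, ih B S (by omega) (by omega)]
    simp only [List.foldl_cons, List.foldl_nil, hgB, hgS]
    rw [pairPos_succ k B S (by omega) (by omega)]
    split_ifs with h1 <;> simp

-- ===== VERDICT (by name: the statement is the Claim_ definition above) =====
theorem best_deals_spec : Claim_equal_best_deals := by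
  intro ba sa sp bp _ hpre
  obtain ⟨hb, hs, hlb, hls⟩ := hpre
  obtain ⟨bl, hbl, hbllen⟩ := mapM_some_of_all _ hb
  obtain ⟨sl, hsl, hsllen⟩ := mapM_some_of_all _ hs
  unfold Spec_best_deals best_deals best_deals_alt
  simp only [hbl, hsl]
  set d : Int := min ba sa with hd
  by_cases hdn : 0 ≤ d
  · have hk : d = ((d.toNat : Nat) : Int) := (Int.toNat_of_nonneg hdn).symm
    have hkb : d.toNat ≤ bl.length := by omega
    have hks : d.toNat ≤ sl.length := by omega
    rw [hk, foldA d.toNat _ _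
        (by rw [PySem.List.length_sorted]; exact hkb)
        (by rw [PySem.List.length_sorted]; exact hks)]
    simp only [Int.toNat_natCast]
    rw [bdLoop_eq d.toNat bl sl 0 hkb hks]
    ring
  · have h0 : d.toNat = 0 := by omega
    rw [PySem.List.pyRange_one_eq_nil (by omega), h0]
    simp [bdLoop]
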